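-- pv_equiv track=rewrite | github.com/Pranayshukla0610/leetcode-solutions | 4231-smallest-pair-with-different-frequencies/smallest-pair-with-different-frequencies.py | minDistinctFreqPair
-- ===== SOURCE A (Python) =====
-- def minDistinctFreqPair(nums: list[int]) -> list[int]:
--     from collections import Counter
--     freq = Counter(nums)
--     values = sorted(freq.keys())
--
--     for i in range(len(values)):
--         for j in range(i+1,len(values)):
--             x = values[i]
--             y = values[j]
--             if freq[x] != freq[y]:
--                 return[x,y]
--
--     return[-1,-1]
-- ===== SOURCE B (Python) =====
-- def minDistinctFreqPair(nums: list[int]) -> list[int]: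
--     # Key fact: if any two distinct values have differing frequencies, then the
--     # smallest value's frequency must differ from some other value's frequency
--     # (otherwise all frequencies equal the smallest's, hence each other's).
--     # So it suffices to scan once for the first value whose frequency differs
--     # from the smallest value's frequency.
--     from collections import Counter
--     freq = Counter(nums)
--     values = sorted(freq.keys())
--     if not values:
--         return [-1, -1]
--     v0 = values[0]
--     f0 = freq[v0]
--     for y in values[1:]:
--         if freq[y] != f0:
--             return [v0, y]
--     return [-1, -1]
-- ===== Notes on version B (the rewrite author's own statement) =====
-- stated objective: alternative
-- what changed: The nested scan over all pairs of distinct values is replaced by a single linear scan comparing each value's frequency against the smallest value's frequency, justified by the fact that if all frequencies equal the smallest value's then all pairs agree.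
import Mathlib
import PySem

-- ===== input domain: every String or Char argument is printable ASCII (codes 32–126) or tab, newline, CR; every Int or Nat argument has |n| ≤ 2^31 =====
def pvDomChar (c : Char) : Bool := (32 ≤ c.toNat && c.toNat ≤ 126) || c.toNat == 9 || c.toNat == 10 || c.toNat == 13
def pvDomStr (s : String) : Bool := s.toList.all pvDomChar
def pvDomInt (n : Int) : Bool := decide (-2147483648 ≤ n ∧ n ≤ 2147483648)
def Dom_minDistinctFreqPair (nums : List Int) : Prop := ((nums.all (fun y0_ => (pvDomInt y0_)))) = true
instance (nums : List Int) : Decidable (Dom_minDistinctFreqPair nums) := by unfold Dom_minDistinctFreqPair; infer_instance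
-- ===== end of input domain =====

-- B replaces A's nested scan over pairs of distinct values by a single linear
-- scan against the smallest value's frequency (objective: alternative algorithm).


-- ===== PORT A =====
-- inner loop: for j in range(i+1, len(values)): y = values[j]; if freq[x] != freq[y]: return [x,y]
def pvAInner (freq : PySem.Dict Int Int) (x : Int) : List Int → Option (List Int)
  | [] => none
  | y :: rest => if freq.getD x 0 ≠ freq.getD y 0 then some [x, y] else pvAInner freq x rest

-- outer loop: for i in range(len(values)): x = values[i]; …  (early return propagated)
def pvAOuter (freq : PySem.Dict Int Int) : List Int → List Int
  | [] => [-1, -1]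
  | x :: rest =>
    match pvAInner freq x rest with
    | some r => r
    | none => pvAOuter freq rest

def minDistinctFreqPair (nums : List Int) : List Int :=
  let freq := PySem.Dict.counter nums
  let values := PySem.List.sorted freq.keys (fun v => v) false
  pvAOuter freq values

-- ===== PORT B =====
-- for y in values[1:]: if freq[y] != f0: return [v0, y]
def pvBFind (freq : PySem.Dict Int Int) (f0 : Int) : List Int → Option Int
  | [] => none
  | y :: rest => if freq.getD y 0 ≠ f0 then some y else pvBFind freq f0 rest

def minDistinctFreqPair_alt (nums : List Int) : List Int :=
  let freq := PySem.Dict.counter nums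
  let values := PySem.List.sorted freq.keys (fun v => v) false
  match values with
  | [] => [-1, -1]
  | v0 :: rest =>
    match pvBFind freq (freq.getD v0 0) rest with
    | some y => [v0, y]
    | none => [-1, -1]

-- ===== PRECONDITION & SPEC =====
def Spec_minDistinctFreqPair (nums : List Int) (out : List Int) : Prop := out = minDistinctFreqPair_alt nums
instance (nums : List Int) (out : List Int) : Decidable (Spec_minDistinctFreqPair nums out) := by unfold Spec_minDistinctFreqPair; infer_instance

-- ===== CLAIM (what is proved, stated in full; the proofs are below) =====
def Claim_equal_minDistinctFreqPair : Prop := ∀ (nums : List Int), Dom_minDistinctFreqPair nums → Spec_minDistinctFreqPair nums (minDistinctFreqPair nums)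

-- ===== LEMMAS AND PROOFS =====

theorem pvAInner_eq_bFind (freq : PySem.Dict Int Int) (x : Int) (l : List Int) :
    pvAInner freq x l = (pvBFind freq (freq.getD x 0) l).map (fun y => [x, y]) := by
  induction l with
  | nil => rfl
  | cons y rest ih =>
    simp only [pvAInner, pvBFind]
    by_cases h : freq.getD x 0 = freq.getD y 0
    · simp [h, ih]
    · simp [h, Ne.symm h]

theorem pvBFind_none_iff (freq : PySem.Dict Int Int) (f0 : Int) (l : List Int) :
    pvBFind freq f0 l = none ↔ ∀ y ∈ l, freq.getD y 0 = f0 := by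
  induction l with
  | nil => simp [pvBFind]
  | cons y rest ih =>
    simp only [pvBFind]
    by_cases h : freq.getD y 0 = f0
    · simp [h, ih]
    · simp [h]

theorem pvAOuter_allEq (freq : PySem.Dict Int Int) (c : Int) (l : List Int)
    (h : ∀ y ∈ l, freq.getD y 0 = c) : pvAOuter freq l = [-1, -1] := by
  induction l with
  | nil => rfl
  | cons x rest ih =>
    have hx : freq.getD x 0 = c := h x (List.mem_cons_self ..)
    have hrest : ∀ y ∈ rest, freq.getD y 0 = c := fun y hy => h y (List.mem_cons_of_mem _ hy)
    have hinner : pvAInner freq x rest = none := by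
      rw [pvAInner_eq_bFind]
      have : pvBFind freq (freq.getD x 0) rest = none := by
        rw [pvBFind_none_iff]
        intro y hy; rw [hrest y hy, hx]
      simp [this]
    simp only [pvAOuter, hinner]
    exact ih hrest

-- ===== VERDICT (by name: the statement is the Claim_ definition above) =====
theorem pvMain_aux (freq : PySem.Dict Int Int) (values : List Int) :
    pvAOuter freq values =
      match values with
      | [] => [-1, -1]
      | v0 :: rest =>
        match pvBFind freq (freq.getD v0 0) rest with
        | some y => [v0, y]
        | none => [-1, -1] := by
  cases values with
  | nil => rfl
  | cons v0 rest =>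
    simp only [pvAOuter, pvAInner_eq_bFind]
    cases hb : pvBFind freq (freq.getD v0 0) rest with
    | some y => simp
    | none =>
      simp only [Option.map_none]
      exact pvAOuter_allEq freq (freq.getD v0 0) rest
        ((pvBFind_none_iff freq (freq.getD v0 0) rest).mp hb)

theorem minDistinctFreqPair_spec : Claim_equal_minDistinctFreqPair := by
  intro nums _
  show minDistinctFreqPair nums = minDistinctFreqPair_alt nums
  simp only [minDistinctFreqPair, minDistinctFreqPair_alt]
  exact pvMain_aux _ _
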